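-- pv_equiv track=rewrite | github.com/datasciencecampus/pygrams | scripts/utils/date_utils.py | timeseries_weekly_to_yearly
-- ===== SOURCE A (Python) =====
-- def timeseries_weekly_to_yearly(weekly_dates, weekly_values):
--     dict_dates = {}
--     for date, value in zip(weekly_dates, weekly_values):
--         year = date // 100
--         new_date = year * 100
--
--         if new_date in dict_dates:
--             dict_dates[new_date] += value
--         else:
--             dict_dates[new_date] = value
--
--     return list(dict_dates.keys()), list(dict_dates.values())
-- ===== SOURCE B (Python) =====
-- def timeseries_weekly_to_yearly(weekly_dates, weekly_values):
--     years = [d // 100 * 100 for d, _ in zip(weekly_dates, weekly_values)]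
--     labels = list(dict.fromkeys(years))
--     totals = [sum(v for y, v in zip(years, weekly_values) if y == label)
--               for label in labels]
--     return labels, totals
-- ===== Notes on version B (the rewrite author's own statement) =====
-- stated objective: alternative
-- what changed: Replaces the incremental dict-accumulation with a group-by decomposition: compute the year label of each pair, take the first-occurrence-ordered distinct labels via dict.fromkeys, then sum the matching values per label in a comprehension.
import Mathlib
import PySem

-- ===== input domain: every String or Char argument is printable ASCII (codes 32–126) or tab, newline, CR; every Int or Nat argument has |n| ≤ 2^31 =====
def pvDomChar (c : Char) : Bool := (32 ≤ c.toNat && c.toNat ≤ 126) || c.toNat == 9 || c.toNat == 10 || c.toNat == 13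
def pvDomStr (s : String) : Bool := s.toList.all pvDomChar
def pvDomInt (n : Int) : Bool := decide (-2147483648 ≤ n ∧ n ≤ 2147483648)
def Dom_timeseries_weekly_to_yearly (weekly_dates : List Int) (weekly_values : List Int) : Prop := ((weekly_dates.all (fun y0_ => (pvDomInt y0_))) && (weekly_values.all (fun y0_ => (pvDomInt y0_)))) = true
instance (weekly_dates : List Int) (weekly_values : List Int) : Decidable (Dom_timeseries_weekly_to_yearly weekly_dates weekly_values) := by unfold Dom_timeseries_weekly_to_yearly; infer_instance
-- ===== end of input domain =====

-- B replaces A's incremental dict accumulation by a group-by: per-pair year labels,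
-- first-occurrence-ordered distinct labels, then a per-label sum (alternative decomposition, same result).

-- ===== PORT A =====
def timeseries_weekly_to_yearly (weekly_dates : List Int) (weekly_values : List Int) : List Int × List Int :=
  let dict_dates : PySem.Dict Int Int :=
    (weekly_dates.zip weekly_values).foldl
      (fun d p =>
        let year := PySem.Int.floordiv p.1 100
        let new_date := year * 100
        if d.contains new_date then d.insert new_date (d.getD new_date 0 + p.2)
        else d.insert new_date p.2)
      PySem.Dict.empty
  (dict_dates.keys, dict_dates.values)

-- ===== PORT B =====
def timeseries_weekly_to_yearly_alt (weekly_dates : List Int) (weekly_values : List Int) : List Int × List Int :=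
  let years := (weekly_dates.zip weekly_values).map (fun p => PySem.Int.floordiv p.1 100 * 100)
  let labels := PySem.List.dedup years
  let totals := labels.map (fun label =>
    (((years.zip weekly_values).filter (fun q => q.1 == label)).map (·.2)).sum)
  (labels, totals)

-- ===== PRECONDITION & SPEC =====
def Spec_timeseries_weekly_to_yearly (weekly_dates : List Int) (weekly_values : List Int) (out : List Int × List Int) : Prop := out = timeseries_weekly_to_yearly_alt weekly_dates weekly_values
instance (weekly_dates : List Int) (weekly_values : List Int) (out : List Int × List Int) : Decidable (Spec_timeseries_weekly_to_yearly weekly_dates weekly_values out) := by unfold Spec_timeseries_weekly_to_yearly; infer_instance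

-- ===== CLAIM (what is proved, stated in full; the proofs are below) =====
def Claim_equal_timeseries_weekly_to_yearly : Prop := ∀ (weekly_dates : List Int) (weekly_values : List Int), Dom_timeseries_weekly_to_yearly weekly_dates weekly_values → Spec_timeseries_weekly_to_yearly weekly_dates weekly_values (timeseries_weekly_to_yearly weekly_dates weekly_values)

-- ===== LEMMAS AND PROOFS =====

-- A's loop body always stores (old value or 0) + v at the key.
theorem pv_step_eq (d : PySem.Dict Int Int) (k v : Int) :
    (if d.contains k then d.insert k (d.getD k 0 + v) else d.insert k v)
      = d.insert k (d.getD k 0 + v) := by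
  by_cases h : d.contains k = true
  · simp [h]
  · simp only [Bool.not_eq_true] at h
    rw [PySem.Dict.getD_of_not_contains (h := h), zero_add, if_neg (by simp [h])]

-- Lookup after A's accumulation fold = initial value + sum of matching values.
theorem pv_getD_fold (key : Int × Int → Int) (l : List (Int × Int)) (d : PySem.Dict Int Int) (k : Int) :
    (l.foldl (fun d p => d.insert (key p) (d.getD (key p) 0 + p.2)) d).getD k 0
      = d.getD k 0 + (((l.map (fun p => (key p, p.2))).filter (fun q => q.1 == k)).map (·.2)).sum := by
  induction l generalizing d with
  | nil => simp
  | cons p t ih =>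
    simp only [List.foldl_cons, List.map_cons, List.filter_cons]
    rw [ih]
    by_cases h : key p = k
    · simp [h, PySem.Dict.getD_insert_self]
      ring
    · simp [h, PySem.Dict.getD_insert, Ne.symm h]

-- zipping values back onto the label list recovers (label, value) pairs.
theorem pv_zip_map (key : Int × Int → Int) :
    ∀ (wd wv : List Int),
      ((wd.zip wv).map key).zip wv = (wd.zip wv).map (fun p => (key p, p.2))
  | [], _ => by simp
  | _ :: _, [] => by simp
  | a :: wd, b :: wv => by
    simp [List.zip_cons_cons, pv_zip_map key wd wv]

-- ===== VERDICT (by name: the statement is the Claim_ definition above) =====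
theorem timeseries_weekly_to_yearly_spec : Claim_equal_timeseries_weekly_to_yearly := by
  intro wd wv _
  unfold Spec_timeseries_weekly_to_yearly timeseries_weekly_to_yearly timeseries_weekly_to_yearly_alt
  simp only []
  set key : Int × Int → Int := fun p => PySem.Int.floordiv p.1 100 * 100 with hkey
  set l := wd.zip wv with hl
  have hstep : (fun (d : PySem.Dict Int Int) (p : Int × Int) =>
        let year := PySem.Int.floordiv p.1 100
        let new_date := year * 100
        if d.contains new_date then d.insert new_date (d.getD new_date 0 + p.2)
        else d.insert new_date p.2)
      = fun d p => d.insert (key p) (d.getD (key p) 0 + p.2) := by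
    funext d p
    exact pv_step_eq d (key p) p.2
  rw [hstep]
  set D := l.foldl (fun (d : PySem.Dict Int Int) p => d.insert (key p) (d.getD (key p) 0 + p.2)) PySem.Dict.empty with hD
  have hkeys : D.keys = PySem.List.dedup (l.map key) := by
    rw [hD, PySem.Dict.keys_foldl_insert_key]
    simp [PySem.Set.update_nil_left]
  have hnodup : D.keys.Nodup := by
    rw [hD]
    exact PySem.Dict.nodup_keys_foldl_insert_key l key _ _ (by simp)
  have hvals : D.values = D.keys.map (fun k => D.getD k 0) :=
    PySem.Dict.values_eq_map_keys D hnodup 0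
  rw [hvals, hkeys, pv_zip_map key wd wv, ← hl]
  refine Prod.ext rfl ?_
  refine List.map_congr_left ?_
  intro k _
  rw [hD, pv_getD_fold key l PySem.Dict.empty k]
  simp
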